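-- pv_equiv track=rewrite | github.com/billyean/acadia | python/bitop/single_number.py | find_in_fours
-- ===== SOURCE A (Python) =====
-- def find_in_fours(nums):
--     one = 0
--     two = 0
--
--     for i in nums:
--         two |= one & i
--         one ^= i
--         three = one & two
--         four =  three & ~one
--         one &= ~four
--         two &= ~four
--         three &= four
--
--     return one
-- ===== SOURCE B (Python) =====
-- def find_in_fours(nums):
--     counts = {}
--     for n in nums:
--         counts[n] = counts.get(n, 0) + 1
--     result = 0
--     for value, count in counts.items():
--         if count % 2:
--             result ^= value
--     return result
-- ===== Notes on version B (the rewrite author's own statement) =====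
-- stated objective: alternative
-- what changed: Replaces the masked two-variable bit-automaton (ones/twos with mask clearing) by a counting dictionary built in one pass followed by an xor of the values that occur an odd number of times.
import Mathlib
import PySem

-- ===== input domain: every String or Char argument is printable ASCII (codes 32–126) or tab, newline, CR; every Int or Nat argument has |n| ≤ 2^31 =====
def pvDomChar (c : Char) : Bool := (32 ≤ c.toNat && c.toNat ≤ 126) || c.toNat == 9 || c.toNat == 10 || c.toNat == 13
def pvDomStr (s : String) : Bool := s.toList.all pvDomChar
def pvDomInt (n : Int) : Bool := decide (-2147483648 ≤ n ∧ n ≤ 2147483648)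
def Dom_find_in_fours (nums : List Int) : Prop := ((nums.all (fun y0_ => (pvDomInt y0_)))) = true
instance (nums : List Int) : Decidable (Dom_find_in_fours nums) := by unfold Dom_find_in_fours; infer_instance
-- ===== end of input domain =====

-- B replaces A's masked two-variable bit automaton by a counting dict followed by an
-- xor of the values with odd multiplicity (objective: alternative; same O(n) cost).

-- ===== PORT A =====
def find_in_fours (nums : List Int) : Int :=
  (nums.foldl
    (fun (s : Int × Int) i =>
      let two := PySem.Int.bor s.2 (PySem.Int.band s.1 i)
      let one := PySem.Int.bxor s.1 i
      let three := PySem.Int.band one two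
      let four := PySem.Int.band three (Int.not one)
      let one := PySem.Int.band one (Int.not four)
      let two := PySem.Int.band two (Int.not four)
      let _three := PySem.Int.band three four
      (one, two))
    (0, 0)).1

-- ===== PORT B =====
def find_in_fours_alt (nums : List Int) : Int :=
  let counts : PySem.Dict Int Int :=
    nums.foldl (fun d n => d.insert n (d.getD n 0 + 1)) PySem.Dict.empty
  counts.items.foldl
    (fun result p => if PySem.Int.mod p.2 2 ≠ 0 then PySem.Int.bxor result p.1 else result) 0

-- ===== PRECONDITION & SPEC =====
def Spec_find_in_fours (nums : List Int) (out : Int) : Prop := out = find_in_fours_alt nums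
instance (nums : List Int) (out : Int) : Decidable (Spec_find_in_fours nums out) := by unfold Spec_find_in_fours; infer_instance

-- ===== CLAIM (what is proved, stated in full; the proofs are below) =====
def Claim_equal_find_in_fours : Prop := ∀ (nums : List Int), Dom_find_in_fours nums → Spec_find_in_fours nums (find_in_fours nums)

-- ===== LEMMAS AND PROOFS =====

-- ---- Nat-level bit facts ----
theorem pv_testBit_one (i : Nat) : Nat.testBit 1 i = decide (i = 0) := by
  cases i with
  | zero => rw [Nat.testBit_zero]; decide
  | succ i =>
    rw [Nat.testBit_succ, show (1:Nat)/2 = 0 by omega, Nat.zero_testBit]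
    simp

theorem pv_ldiff_small (e f : Nat) (he : e < 2) (hf : f < 2) : e.ldiff f = e * (1 - f) := by
  apply Nat.eq_of_testBit_eq
  intro i
  rw [Nat.testBit_ldiff]
  interval_cases e <;> interval_cases f <;>
    simp [Nat.zero_testBit, pv_testBit_one]

theorem pv_and_bits (a b e f : Nat) (he : e < 2) (hf : f < 2) :
    (2*a+e) &&& (2*b+f) = 2*(a &&& b) + (e &&& f) := by
  have hef : e &&& f < 2 := Nat.lt_of_le_of_lt Nat.and_le_left he
  apply Nat.eq_of_testBit_eq
  intro i
  cases i with
  | zero =>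
    rw [Nat.testBit_and, Nat.testBit_zero, Nat.testBit_zero, Nat.testBit_zero]
    rw [show (2*a+e) % 2 = e by omega, show (2*b+f) % 2 = f by omega,
        show (2*(a &&& b)+(e &&& f)) % 2 = e &&& f by omega]
    interval_cases e <;> interval_cases f <;> decide
  | succ i =>
    rw [Nat.testBit_and, Nat.testBit_succ, Nat.testBit_succ, Nat.testBit_succ]
    rw [show (2*a+e) / 2 = a by omega, show (2*b+f) / 2 = b by omega,
        show (2*(a &&& b)+(e &&& f)) / 2 = a &&& b by omega, Nat.testBit_and]

theorem pv_ldiff_bits (a b e f : Nat) (he : e < 2) (hf : f < 2) :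
    (2*a+e).ldiff (2*b+f) = 2*(a.ldiff b) + (e.ldiff f) := by
  have hef : e.ldiff f < 2 := by
    rw [pv_ldiff_small e f he hf]
    interval_cases e <;> interval_cases f <;> norm_num
  apply Nat.eq_of_testBit_eq
  intro i
  cases i with
  | zero =>
    rw [Nat.testBit_ldiff, Nat.testBit_zero, Nat.testBit_zero, Nat.testBit_zero]
    rw [show (2*a+e) % 2 = e by omega, show (2*b+f) % 2 = f by omega,
        show (2*(a.ldiff b)+(e.ldiff f)) % 2 = e.ldiff f by omega,
        pv_ldiff_small e f he hf]
    interval_cases e <;> interval_cases f <;> decide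
  | succ i =>
    rw [Nat.testBit_ldiff, Nat.testBit_succ, Nat.testBit_succ, Nat.testBit_succ]
    rw [show (2*a+e) / 2 = a by omega, show (2*b+f) / 2 = b by omega,
        show (2*(a.ldiff b)+(e.ldiff f)) / 2 = a.ldiff b by omega, Nat.testBit_ldiff]

theorem pv_sub_and_step (a b e f : Nat) (he : e < 2) (hf : f < 2)
    (iha : a - (a &&& b) = a.ldiff b) :
    (2*a+e) - ((2*a+e) &&& (2*b+f)) = (2*a+e).ldiff (2*b+f) := by
  rw [pv_and_bits a b e f he hf, pv_ldiff_bits a b e f he hf]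
  have h5 : a &&& b ≤ a := Nat.and_le_left
  have h6 : e &&& f ≤ e := Nat.and_le_left
  have h4 : e - (e &&& f) = e.ldiff f := by
    rw [pv_ldiff_small e f he hf]
    interval_cases e <;> interval_cases f <;> decide
  omega

theorem pv_sub_and (m n : Nat) : m - (m &&& n) = m.ldiff n := by
  induction m using Nat.strong_induction_on generalizing n with
  | _ m ih =>
    rcases Nat.eq_zero_or_pos m with hm | hm
    · subst hm
      apply Nat.eq_of_testBit_eq
      intro i
      simp [Nat.zero_and, Nat.testBit_ldiff, Nat.zero_testBit]
    · have ha2 : m / 2 < m := Nat.div_lt_self hm (by norm_num)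
      have hstep := pv_sub_and_step (m/2) (n/2) (m%2) (n%2) (by omega) (by omega)
        (ih (m/2) ha2 (n/2))
      rw [show n = 2*(n/2)+n%2 by omega, show m = 2*(m/2)+m%2 by omega]
      exact hstep

-- ---- Int testBit facts for the PySem bitwise primitives ----
theorem pv_testBit_natCast (m k : Nat) : Int.testBit (↑m) k = m.testBit k := rfl

theorem pv_testBit_negSucc (m k : Nat) : Int.testBit (Int.negSucc m) k = !(m.testBit k) := rfl

theorem pv_testBit_zero (k : Nat) : Int.testBit 0 k = false := by
  rw [show (0:Int) = ((0:Nat):Int) from rfl, pv_testBit_natCast, Nat.zero_testBit]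

theorem pv_negSucc_sub (m : Nat) : -Int.negSucc m - 1 = (m : Int) := by
  rw [Int.negSucc_eq]; ring

theorem pv_neg_natCast_sub (x : Nat) : -(x:Int) - 1 = Int.negSucc x := by
  rw [Int.negSucc_eq]; ring

theorem pv_tb_bxor (a b : Int) (k : Nat) :
    Int.testBit (PySem.Int.bxor a b) k = (Int.testBit a k ^^ Int.testBit b k) := by
  rcases a with m | m <;> rcases b with n | n <;>
    simp only [PySem.Int.bxor, Int.ofNat_eq_natCast, Int.natCast_nonneg,
      Int.negSucc_not_nonneg, if_true, if_false,
      Int.toNat_natCast, pv_negSucc_sub, pv_neg_natCast_sub,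
      pv_testBit_natCast, pv_testBit_negSucc, Nat.testBit_xor] <;>
    (cases hm : m.testBit k <;> cases hn : n.testBit k <;> rfl)

theorem pv_tb_band (a b : Int) (k : Nat) :
    Int.testBit (PySem.Int.band a b) k = (Int.testBit a k && Int.testBit b k) := by
  rcases a with m | m <;> rcases b with n | n <;>
    simp only [PySem.Int.band, Int.ofNat_eq_natCast, Int.natCast_nonneg,
      Int.negSucc_not_nonneg, if_true, if_false,
      Int.toNat_natCast, pv_negSucc_sub, pv_neg_natCast_sub,
      pv_sub_and, pv_testBit_natCast, pv_testBit_negSucc,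
      Nat.testBit_ldiff, Nat.testBit_and, Nat.testBit_or] <;>
    (cases hm : m.testBit k <;> cases hn : n.testBit k <;> rfl)

theorem pv_tb_not (a : Int) (k : Nat) :
    Int.testBit (Int.not a) k = !(Int.testBit a k) := by
  rcases a with m | m
  · rfl
  · show Int.testBit (Int.ofNat m) k = !(Int.testBit (Int.negSucc m) k)
    rw [Int.ofNat_eq_natCast, pv_testBit_natCast, pv_testBit_negSucc, Bool.not_not]

theorem pv_int_ext {a b : Int} (h : ∀ k, Int.testBit a k = Int.testBit b k) : a = b := by
  have hbit : ∀ (m n : Nat),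
      (∀ k, Int.testBit (Int.ofNat m) k = Int.testBit (Int.negSucc n) k) → False := by
    intro m n hmn
    have hm : m.testBit (m+n) = false :=
      Nat.testBit_eq_false_of_lt
        (Nat.lt_of_lt_of_le Nat.lt_two_pow_self
          (Nat.pow_le_pow_right (by norm_num) (Nat.le_add_right m n)))
    have hn : n.testBit (m+n) = false :=
      Nat.testBit_eq_false_of_lt
        (Nat.lt_of_lt_of_le Nat.lt_two_pow_self
          (Nat.pow_le_pow_right (by norm_num) (Nat.le_add_left n m)))
    have h1 : m.testBit (m+n) = !(n.testBit (m+n)) := hmn (m + n)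
    rw [hm, hn] at h1
    exact absurd h1 (by decide)
  rcases a with m | m <;> rcases b with n | n
  · congr 1
    apply Nat.eq_of_testBit_eq
    intro i
    exact h i
  · exact (hbit m n h).elim
  · exact (hbit n m (fun k => (h k).symm)).elim
  · congr 1
    apply Nat.eq_of_testBit_eq
    intro i
    have hi : (!(m.testBit i)) = (!(n.testBit i)) := h i
    cases hmi : m.testBit i <;> cases hni : n.testBit i <;> simp_all

-- ---- derived algebra on the PySem primitives ----
theorem pv_bxor_assoc (a b c : Int) :
    PySem.Int.bxor (PySem.Int.bxor a b) c = PySem.Int.bxor a (PySem.Int.bxor b c) := by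
  apply pv_int_ext
  intro k
  simp only [pv_tb_bxor]
  cases ha : Int.testBit a k <;> cases hb : Int.testBit b k <;>
    cases hc : Int.testBit c k <;> rfl

theorem pv_band_bandnot (x t : Int) :
    PySem.Int.band (PySem.Int.band x t) (Int.not x) = 0 := by
  apply pv_int_ext
  intro k
  simp only [pv_tb_band, pv_tb_not, pv_testBit_zero]
  cases hx : Int.testBit x k <;> cases ht : Int.testBit t k <;> rfl

theorem pv_zero_bxor (a : Int) : PySem.Int.bxor 0 a = a := by
  rw [PySem.Int.bxor_comm, PySem.Int.bxor_zero]

theorem pv_bxor_cancel (x y : Int) : PySem.Int.bxor (PySem.Int.bxor x y) x = y := by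
  rw [PySem.Int.bxor_comm x y, pv_bxor_assoc, PySem.Int.bxor_self, PySem.Int.bxor_zero]

-- ---- A's loop computes the running xor ----
theorem pv_step_one (o t i : Int) :
    PySem.Int.band (PySem.Int.bxor o i)
      (Int.not (PySem.Int.band (PySem.Int.band (PySem.Int.bxor o i) t) (Int.not (PySem.Int.bxor o i))))
      = PySem.Int.bxor o i := by
  rw [pv_band_bandnot, show Int.not 0 = -1 by decide, PySem.Int.band_neg_one]

theorem pv_step_two (o t i : Int) :
    PySem.Int.band t
      (Int.not (PySem.Int.band (PySem.Int.band (PySem.Int.bxor o i) t) (Int.not (PySem.Int.bxor o i))))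
      = t := by
  rw [pv_band_bandnot, show Int.not 0 = -1 by decide, PySem.Int.band_neg_one]

def pvXorAll (l : List Int) : Int := l.foldl PySem.Int.bxor 0

theorem pv_A_loop (l : List Int) : ∀ (one two : Int),
    (l.foldl
      (fun (s : Int × Int) i =>
        let two := PySem.Int.bor s.2 (PySem.Int.band s.1 i)
        let one := PySem.Int.bxor s.1 i
        let three := PySem.Int.band one two
        let four := PySem.Int.band three (Int.not one)
        let one := PySem.Int.band one (Int.not four)
        let two := PySem.Int.band two (Int.not four)
        let _three := PySem.Int.band three four
        (one, two))
      (one, two)).1 = l.foldl PySem.Int.bxor one := by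
  induction l with
  | nil => intro one two; rfl
  | cons i t ih =>
    intro one two
    simp only [List.foldl_cons]
    rw [pv_step_one one (PySem.Int.bor two (PySem.Int.band one i)) i,
        pv_step_two one (PySem.Int.bor two (PySem.Int.band one i)) i]
    exact ih (PySem.Int.bxor one i) (PySem.Int.bor two (PySem.Int.band one i))

theorem pv_A_eq (nums : List Int) : find_in_fours nums = pvXorAll nums :=
  pv_A_loop nums 0 0

-- ---- B: xor over the odd-multiplicity distinct values = the running xor ----
def pvXfold (p : Int → Bool) (s : List Int) (a : Int) : Int :=
  s.foldl (fun r k => if p k then PySem.Int.bxor r k else r) a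

theorem pv_xfold_pull (p : Int → Bool) (s : List Int) : ∀ (a : Int),
    pvXfold p s a = PySem.Int.bxor a (pvXfold p s 0) := by
  induction s with
  | nil => intro a; simp [pvXfold, PySem.Int.bxor_zero]
  | cons k t ih =>
    intro a
    show pvXfold p t (if p k then PySem.Int.bxor a k else a)
      = PySem.Int.bxor a (pvXfold p t (if p k then PySem.Int.bxor 0 k else 0))
    by_cases h : p k
    · rw [if_pos h, if_pos h, ih, ih (PySem.Int.bxor 0 k), pv_zero_bxor, ← pv_bxor_assoc]
    · rw [if_neg h, if_neg h, ih]

theorem pv_xfold_congr (p q : Int → Bool) (s : List Int) (a : Int)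
    (h : ∀ k ∈ s, p k = q k) : pvXfold p s a = pvXfold q s a := by
  apply PySem.List.foldl_congr_mem
  intro acc x hx
  rw [h x hx]

theorem pv_xfold_toggle (p : Int → Bool) (x : Int) : ∀ (s : List Int),
    s.Nodup → x ∈ s →
    pvXfold (fun k => if k = x then !(p k) else p k) s 0
      = PySem.Int.bxor (pvXfold p s 0) x := by
  intro s
  induction s with
  | nil => intro _ hx; cases hx
  | cons k t ih =>
    intro hnd hx
    rw [List.nodup_cons] at hnd
    show pvXfold _ t (if (if k = x then !(p k) else p k) then PySem.Int.bxor 0 k else 0)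
      = PySem.Int.bxor (pvXfold p t (if p k then PySem.Int.bxor 0 k else 0)) x
    by_cases hk : k = x
    · subst hk
      have hcong : ∀ a, pvXfold (fun j => if j = k then !(p j) else p j) t a = pvXfold p t a := by
        intro a
        apply pv_xfold_congr
        intro j hj
        have hjk : j ≠ k := fun hh => hnd.1 (by rw [← hh]; exact hj)
        rw [if_neg hjk]
      rw [if_pos rfl, hcong]
      cases hp : p k
      · rw [if_pos (show (!false) = true from rfl), if_neg (show ¬(false = true) by decide)]
        rw [pv_xfold_pull p t (PySem.Int.bxor 0 k), pv_zero_bxor, PySem.Int.bxor_comm]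
      · rw [if_neg (show ¬((!true) = true) by decide), if_pos rfl]
        rw [pv_xfold_pull p t (PySem.Int.bxor 0 k), pv_zero_bxor, pv_bxor_cancel]
    · have hxt : x ∈ t := by
        rcases List.mem_cons.1 hx with hh | hh
        · exact absurd hh.symm hk
        · exact hh
      rw [if_neg hk, pv_xfold_pull _ t, pv_xfold_pull p t (if p k then PySem.Int.bxor 0 k else 0),
        ih hnd.2 hxt, ← pv_bxor_assoc]

theorem pv_count_parity (c : Nat) : (((c + 1) % 2 == 1) : Bool) = !((c % 2 == 1) : Bool) := by
  rcases Nat.mod_two_eq_zero_or_one c with h | h <;>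
    rw [show (c+1) % 2 = 1 - c % 2 by omega, h] <;> rfl

theorem pv_M (l : List Int) :
    pvXfold (fun k => List.count k l % 2 == 1) (PySem.Set.ofList l) 0 = pvXorAll l := by
  induction l using List.reverseRecOn with
  | nil => rfl
  | append_singleton l x ih =>
    have hR : pvXorAll (l ++ [x]) = PySem.Int.bxor (pvXorAll l) x := by
      simp [pvXorAll, List.foldl_append]
    have hcx : List.count x (l ++ [x]) = List.count x l + 1 := by
      simp [List.count_append]
    have hck : ∀ k : Int, k ≠ x → List.count k (l ++ [x]) = List.count k l := by
      intro k hk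
      rw [List.count_append, List.count_cons, List.count_nil]
      simp [Ne.symm hk]
    rw [hR, PySem.Set.ofList_append_singleton]
    by_cases hx : x ∈ l
    · rw [PySem.Set.add_of_mem ((PySem.Set.mem_ofList l x).2 hx)]
      have hcong : pvXfold (fun k => List.count k (l ++ [x]) % 2 == 1) (PySem.Set.ofList l) 0
          = pvXfold (fun k => if k = x then !(List.count k l % 2 == 1) else (List.count k l % 2 == 1))
              (PySem.Set.ofList l) 0 := by
        apply pv_xfold_congr
        intro k _
        by_cases hkx : k = x
        · subst hkx
          rw [if_pos rfl, hcx, pv_count_parity]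
        · rw [if_neg hkx, hck k hkx]
      rw [hcong, pv_xfold_toggle _ x (PySem.Set.ofList l) (PySem.Set.nodup_ofList l)
        ((PySem.Set.mem_ofList l x).2 hx), ih]
    · rw [PySem.Set.add_of_not_mem (fun h => hx ((PySem.Set.mem_ofList l x).1 h))]
      have hsplit : pvXfold (fun k => List.count k (l ++ [x]) % 2 == 1) (PySem.Set.ofList l ++ [x]) 0
          = pvXfold (fun k => List.count k (l ++ [x]) % 2 == 1) [x]
              (pvXfold (fun k => List.count k (l ++ [x]) % 2 == 1) (PySem.Set.ofList l) 0) := by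
        simp [pvXfold, List.foldl_append]
      rw [hsplit]
      have hcong : pvXfold (fun k => List.count k (l ++ [x]) % 2 == 1) (PySem.Set.ofList l) 0
          = pvXfold (fun k => List.count k l % 2 == 1) (PySem.Set.ofList l) 0 := by
        apply pv_xfold_congr
        intro k hk
        have hkx : k ≠ x := fun hh => hx (by rw [← hh]; exact (PySem.Set.mem_ofList l k).1 hk)
        exact congrArg (fun c => (c % 2 == 1 : Bool)) (hck k hkx)
      rw [hcong, ih]
      have hpx : ((List.count x (l ++ [x]) % 2 == 1) : Bool) = true := by
        rw [hcx, List.count_eq_zero.2 hx]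
        decide
      show (if (List.count x (l ++ [x]) % 2 == 1 : Bool) then PySem.Int.bxor (pvXorAll l) x
            else pvXorAll l) = PySem.Int.bxor (pvXorAll l) x
      rw [hpx]
      rfl

theorem pv_alt_eq (nums : List Int) : find_in_fours_alt nums = pvXorAll nums := by
  show (List.foldl (fun d n => d.insert n (d.getD n 0 + 1)) PySem.Dict.empty nums).items.foldl
      (fun result p => if PySem.Int.mod p.2 2 ≠ 0 then PySem.Int.bxor result p.1 else result) 0
    = pvXorAll nums
  rw [PySem.Dict.foldl_insert_getD_add_one_eq_counter, PySem.Dict.items_counter, List.foldl_map]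
  have hcong := PySem.List.foldl_congr_mem (PySem.Set.ofList nums)
    (fun (r : Int) (k : Int) =>
      if PySem.Int.mod ((List.count k nums : Nat) : Int) 2 ≠ 0 then PySem.Int.bxor r k else r)
    (fun (r : Int) (k : Int) =>
      if (List.count k nums % 2 == 1 : Bool) then PySem.Int.bxor r k else r) 0
    (by
      intro acc k _
      show (if PySem.Int.mod ((List.count k nums : Nat) : Int) (((2:Nat) : Int)) ≠ 0
            then PySem.Int.bxor acc k else acc)
          = (if (List.count k nums % 2 == 1 : Bool) then PySem.Int.bxor acc k else acc)
      rw [PySem.Int.mod_natCast]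
      rcases Nat.mod_two_eq_zero_or_one (List.count k nums) with h | h <;> rw [h] <;> simp)
  rw [hcong]
  exact pv_M nums

-- ===== VERDICT (by name: the statement is the Claim_ definition above) =====
theorem find_in_fours_spec : Claim_equal_find_in_fours := by
  intro nums _
  show find_in_fours nums = find_in_fours_alt nums
  rw [pv_A_eq, pv_alt_eq]
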